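-- pv_equiv track=rewrite | github.com/abhishekprakash256/Python | Dr.Kumar_book/same_prime.py | same_prime
-- ===== SOURCE A (Python) =====
-- def check_prime(number:int) ->int:
-- 	"""
-- 	The fuction checks for the prime number
--
--
-- 	"""
--
-- 	count = 0
--
-- 	for i in range(1,number+1):
--
-- 		if number % i == 0:
--
-- 			count+=1
--
-- 			if count>2:
--
-- 				return True
--
-- 	return False
--
-- def same_prime(num_1:int , num_2:int) ->int:
-- 	"""
-- 	The function checks two numbers has the same prime divisor or not
--
-- 	Arguments:
-- 		num_1 (int) -> the integer value
--
-- 	Return: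
--
-- 		prime_val (int) -> the common integer value
-- 	"""
--
-- 	smaller_num = num_2
--
-- 	if num_1 < num_2:
-- 		smaller_num = num_1
--
-- 	for i in range(2,smaller_num+1):
--
-- 		if (num_1 % i) == 0 and (num_2 % i == 0):
--
-- 			if check_prime(i) == False:
--
-- 				return "Have same prime divisor"
--
--
-- 	return "Not same prime divisor"
-- ===== SOURCE B (Python) =====
-- def same_prime(num_1, num_2):
--     """Euclidean-gcd re-implementation: two numbers share a prime divisor
--     iff gcd > 1; the smaller-number guard matches A's empty-range edge."""
--     smaller_num = num_1 if num_1 < num_2 else num_2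
--     if smaller_num < 2:
--         return "Not same prime divisor"
--     a, b = num_1, num_2
--     while b:
--         a, b = b, a % b
--     if a > 1:
--         return "Have same prime divisor"
--     return "Not same prime divisor"
-- ===== Notes on version B (the rewrite author's own statement) =====
-- stated objective: faster
-- what changed: Replaces the trial-division scan over 2..min (with an inner O(i) primality check per candidate) by a Euclidean gcd loop: the answer is gcd(num_1,num_2) > 1, guarded by min(num_1,num_2) >= 2 to match A's empty-range edge.
import Mathlib
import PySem

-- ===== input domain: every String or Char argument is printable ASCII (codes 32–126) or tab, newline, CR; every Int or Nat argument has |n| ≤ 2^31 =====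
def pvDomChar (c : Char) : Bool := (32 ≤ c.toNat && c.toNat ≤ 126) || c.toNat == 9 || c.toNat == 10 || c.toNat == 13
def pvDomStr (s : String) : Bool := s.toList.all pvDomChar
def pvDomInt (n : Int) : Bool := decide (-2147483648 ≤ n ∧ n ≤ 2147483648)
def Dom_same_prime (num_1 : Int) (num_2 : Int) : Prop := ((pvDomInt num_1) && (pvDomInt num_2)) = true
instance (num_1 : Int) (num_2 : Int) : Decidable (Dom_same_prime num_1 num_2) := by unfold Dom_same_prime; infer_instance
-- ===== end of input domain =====

-- B replaces A's trial-division scan (with an inner divisor-count primality check) by a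
-- Euclidean gcd loop guarded by min(num_1,num_2) >= 2; a timing run measures the speed-up.

-- ===== PORT A =====
-- for i in range(1, number+1): if number % i == 0: count += 1; if count > 2: return True
def check_prime_go (number : Int) : List Int → Int → Bool
  | [], _ => false
  | i :: rest, count =>
    if PySem.Int.mod number i = 0 then
      if count + 1 > 2 then true else check_prime_go number rest (count + 1)
    else check_prime_go number rest count

def check_prime (number : Int) : Bool :=
  check_prime_go number (PySem.List.pyRange 1 (number + 1) 1) 0

-- for i in range(2, smaller_num+1): if both divisible and check_prime(i) == False: return …
def same_prime_go (num_1 num_2 : Int) : List Int → String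
  | [] => "Not same prime divisor"
  | i :: rest =>
    if PySem.Int.mod num_1 i = 0 ∧ PySem.Int.mod num_2 i = 0 then
      if check_prime i = false then "Have same prime divisor"
      else same_prime_go num_1 num_2 rest
    else same_prime_go num_1 num_2 rest

def same_prime (num_1 : Int) (num_2 : Int) : String :=
  let smaller_num := if num_1 < num_2 then num_1 else num_2
  same_prime_go num_1 num_2 (PySem.List.pyRange 2 (smaller_num + 1) 1)

-- ===== PORT B =====
-- while b: a, b = b, a % b
def euclid (a b : Int) : Int :=
  if _hb : b = 0 then a else euclid b (PySem.Int.mod a b)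
termination_by b.natAbs
decreasing_by
  rcases lt_trichotomy b 0 with h | h | h
  · have := PySem.Int.mod_neg_bounds a h
    omega
  · omega
  · have h1 := PySem.Int.mod_nonneg a h
    have h2 := PySem.Int.mod_lt a h
    omega

def same_prime_alt (num_1 : Int) (num_2 : Int) : String :=
  let smaller_num := if num_1 < num_2 then num_1 else num_2
  if smaller_num < 2 then "Not same prime divisor"
  else if euclid num_1 num_2 > 1 then "Have same prime divisor"
  else "Not same prime divisor"

-- ===== PRECONDITION & SPEC =====
def Spec_same_prime (num_1 : Int) (num_2 : Int) (out : String) : Prop := out = same_prime_alt num_1 num_2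
instance (num_1 : Int) (num_2 : Int) (out : String) : Decidable (Spec_same_prime num_1 num_2 out) := by unfold Spec_same_prime; infer_instance

-- ===== CLAIM (what is proved, stated in full; the proofs are below) =====
def Claim_equal_same_prime : Prop := ∀ (num_1 : Int) (num_2 : Int), Dom_same_prime num_1 num_2 → Spec_same_prime num_1 num_2 (same_prime num_1 num_2)

-- ===== LEMMAS AND PROOFS =====

-- A's loop returns "Have…" iff some listed i divides both and passes the check.
lemma same_prime_go_eq (n1 n2 : Int) (l : List Int) :
    same_prime_go n1 n2 l =
      if ∃ i ∈ l, (PySem.Int.mod n1 i = 0 ∧ PySem.Int.mod n2 i = 0) ∧ check_prime i = false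
      then "Have same prime divisor" else "Not same prime divisor" := by
  induction l with
  | nil => simp [same_prime_go]
  | cons i rest ih =>
    simp only [same_prime_go, List.exists_mem_cons_iff]
    by_cases hdiv : PySem.Int.mod n1 i = 0 ∧ PySem.Int.mod n2 i = 0
    · by_cases hcp : check_prime i = false
      · simp [hdiv, hcp]
      · simp [hdiv, hcp, ih]
    · simp [hdiv, ih]

-- check_prime_go counts divisors with early exit past 2.
lemma check_prime_go_eq (num : Int) (l : List Int) (c : Int) (hc : c ≤ 2) :
    check_prime_go num l c =
      decide (2 < c + (l.countP (fun i => PySem.Int.mod num i = 0) : Int)) := by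
  induction l generalizing c with
  | nil => simp [check_prime_go]; omega
  | cons i rest ih =>
    simp only [check_prime_go, List.countP_cons]
    by_cases hdiv : PySem.Int.mod num i = 0
    · by_cases hbig : c + 1 > 2
      · have hc2 : c = 2 := by omega
        subst hc2
        have hcnt : (0:Int) ≤ (rest.countP (fun i => PySem.Int.mod num i = 0) : Int) :=
          Int.natCast_nonneg _
        simp [hdiv]
      · rw [if_pos hdiv, if_neg hbig, ih (c + 1) (by omega)]
        simp [hdiv]
        constructor <;> intro h <;> omega
    · rw [if_neg hdiv, ih c hc]
      simp [hdiv]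

-- For a prime p, the divisors of p in [1, p] are only 1 and p, so check_prime p = false.
lemma check_prime_of_prime (p : Nat) (hp : p.Prime) : check_prime (p : Int) = false := by
  unfold check_prime
  rw [check_prime_go_eq _ _ _ (by omega)]
  simp only [decide_eq_false_iff_not, not_lt, Int.zero_add]
  have hle : (PySem.List.pyRange 1 ((p : Int) + 1) 1).countP
      (fun i => PySem.Int.mod (p : Int) i = 0) ≤ 2 := by
    rw [List.countP_eq_length_filter]
    have hnd : ((PySem.List.pyRange 1 ((p : Int) + 1) 1).filter
        (fun i => decide (PySem.Int.mod (p : Int) i = 0))).Nodup :=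
      (PySem.List.nodup_pyRange_one 1 ((p : Int) + 1)).filter _
    have hsub : ((PySem.List.pyRange 1 ((p : Int) + 1) 1).filter
        (fun i => decide (PySem.Int.mod (p : Int) i = 0))) ⊆ [1, (p : Int)] := by
      intro x hx
      have hmem := List.mem_of_mem_filter hx
      have hpred := List.of_mem_filter hx
      rw [PySem.List.mem_pyRange_one] at hmem
      simp only [decide_eq_true_eq, PySem.Int.mod_eq_zero_iff_dvd] at hpred
      have hx1 : 1 ≤ x := hmem.1
      have hdvd : x.toNat ∣ p := by
        have : ((x.toNat : Int)) ∣ (p : Int) := by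
          rwa [Int.toNat_of_nonneg (by omega)]
        exact_mod_cast this
      rcases (Nat.Prime.eq_one_or_self_of_dvd hp _ hdvd) with h1 | h1
      · have : x = 1 := by omega
        simp [this]
      · have : x = (p : Int) := by omega
        simp [this]
    calc _ ≤ ([1, (p : Int)]).length := (hnd.subperm hsub).length_le
    _ = 2 := rfl
  exact_mod_cast hle

-- euclid computes Int.gcd on nonnegative inputs.
lemma euclid_eq_gcd (a b : Int) (ha : 0 ≤ a) (hb : 0 ≤ b) :
    euclid a b = (Int.gcd a b : Int) := by
  by_cases h0 : b = 0
  · subst h0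
    rw [euclid]
    simp [Int.gcd, Int.natAbs_of_nonneg ha]
  · have hbpos : 0 < b := lt_of_le_of_ne hb (Ne.symm h0)
    rw [euclid, dif_neg h0,
      euclid_eq_gcd b (PySem.Int.mod a b) hb (PySem.Int.mod_nonneg a hbpos),
      PySem.Int.mod_eq_emod_of_pos hbpos, Int.gcd_comm, ← Int.gcd_emod a b]
termination_by b.natAbs
decreasing_by
  have h1 := PySem.Int.mod_nonneg a (by omega : (0:Int) < b)
  have h2 := PySem.Int.mod_lt a (by omega : (0:Int) < b)
  omega

-- ===== VERDICT (by name: the statement is the Claim_ definition above) =====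
theorem same_prime_spec : Claim_equal_same_prime := by
  intro n1 n2 _
  unfold Spec_same_prime
  set s : Int := if n1 < n2 then n1 else n2 with hs
  have hA : same_prime n1 n2 = same_prime_go n1 n2 (PySem.List.pyRange 2 (s + 1) 1) := rfl
  have hB : same_prime_alt n1 n2 =
      (if s < 2 then "Not same prime divisor"
       else if euclid n1 n2 > 1 then "Have same prime divisor"
       else "Not same prime divisor") := rfl
  rw [hA, hB]
  have hsle1 : s ≤ n1 := by rw [hs]; split <;> omega
  have hsle2 : s ≤ n2 := by rw [hs]; split <;> omega
  have hsor : s = n1 ∨ s = n2 := by rw [hs]; split <;> simp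
  by_cases hsmall : s < 2
  · rw [if_pos hsmall, PySem.List.pyRange_one_eq_nil (by omega)]
    rfl
  · rw [if_neg hsmall]
    have hn1 : 2 ≤ n1 := by omega
    have hn2 : 2 ≤ n2 := by omega
    rw [same_prime_go_eq, euclid_eq_gcd n1 n2 (by omega) (by omega)]
    by_cases hgood : ∃ i ∈ PySem.List.pyRange 2 (s + 1) 1,
        (PySem.Int.mod n1 i = 0 ∧ PySem.Int.mod n2 i = 0) ∧ check_prime i = false
    · -- a common divisor ≥ 2 exists, so gcd > 1
      obtain ⟨i, hmem, ⟨hd1, hd2⟩, _⟩ := hgood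
      rw [PySem.List.mem_pyRange_one] at hmem
      rw [PySem.Int.mod_eq_zero_iff_dvd] at hd1 hd2
      have hdg : i ∣ ((Int.gcd n1 n2 : Nat) : Int) := Int.dvd_coe_gcd hd1 hd2
      have hgpos : ((Int.gcd n1 n2 : Nat) : Int) ≠ 0 := by
        intro h
        have h0 : Int.gcd n1 n2 = 0 := by exact_mod_cast h
        rw [Int.gcd_eq_zero_iff] at h0
        omega
      have : i ≤ ((Int.gcd n1 n2 : Nat) : Int) := Int.le_of_dvd (by positivity) hdg
      rw [if_pos (by exact ⟨i, by rw [PySem.List.mem_pyRange_one]; omega,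
        by rw [PySem.Int.mod_eq_zero_iff_dvd, PySem.Int.mod_eq_zero_iff_dvd]; exact ⟨hd1, hd2⟩,
        by assumption⟩), if_pos (by omega)]
    · -- no witness: show gcd ≤ 1, since a gcd > 1 would yield its least prime factor as witness
      rw [if_neg hgood]
      by_cases hg1 : (1 : Int) < ((Int.gcd n1 n2 : Nat) : Int)
      · exfalso
        apply hgood
        have hgn : 1 < Int.gcd n1 n2 := by exact_mod_cast hg1
        set q : Nat := (Int.gcd n1 n2).minFac with hq
        have hqprime : q.Prime := Nat.minFac_prime (by omega)
        have hqg : q ∣ Int.gcd n1 n2 := Nat.minFac_dvd _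
        have hd1 : (q : Int) ∣ n1 :=
          dvd_trans (Int.natCast_dvd_natCast.mpr hqg) (Int.gcd_dvd_left n1 n2)
        have hd2 : (q : Int) ∣ n2 :=
          dvd_trans (Int.natCast_dvd_natCast.mpr hqg) (Int.gcd_dvd_right n1 n2)
        have ht1 : ((Int.gcd n1 n2 : Nat) : Int) ≤ n1 :=
          Int.le_of_dvd (by omega) (Int.gcd_dvd_left n1 n2)
        have ht2 : ((Int.gcd n1 n2 : Nat) : Int) ≤ n2 :=
          Int.le_of_dvd (by omega) (Int.gcd_dvd_right n1 n2)
        have hds : ((Int.gcd n1 n2 : Nat) : Int) ≤ s := by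
          rcases hsor with h | h <;> omega
        have hqle : q ≤ Int.gcd n1 n2 := Nat.minFac_le (by omega)
        refine ⟨(q : Nat), ?_, ⟨?_, ?_⟩, check_prime_of_prime q hqprime⟩
        · rw [PySem.List.mem_pyRange_one]
          have := hqprime.two_le
          omega
        · rwa [PySem.Int.mod_eq_zero_iff_dvd]
        · rwa [PySem.Int.mod_eq_zero_iff_dvd]
      · rw [if_neg (by omega)]
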